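-- pv_equiv track=rewrite | github.com/zaboople/techknow | python/myexamples/pi_chudnovsky2.py | new_binary_split
-- ===== SOURCE A (Python) =====
-- class TreeNode:
--     """
--     This is really a node in a binary tree. Nodes point to parents
--     instead of the other way around. Each parent has a left & right
--     value that is computed by its children and dropped into the
--     parent accordingly, so a child has to know if it's a lefty or
--     righty.
--     """
--     def __init__(self, a, b, target, isLeft):
--         self.lohi=(a, b)
--         self.parentNode = target
--         self.isLeft = isLeft
--         self.leftTriple = None
--         self.rightTriple = None
--
--     def nullify(self):
--         for x in self.__dict__:
--             self.__dict__[x] = None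
--
-- def computeLeaf(a, b):
--     Pab = -(6*a - 5) * (2*a - 1) * (6*a - 1)
--     Qab = 10939058860032000 * a**3
--     Rab = Pab * (545140134*a + 13591409)
--     return Pab, Qab, Rab
--
-- def computeNode(tripleA, tripleB):
--     pa, qa, ra = tripleA
--     pb, qb, rb = tripleB
--     return (
--         pa * pb,
--         qa * qb,
--         qb * ra + pa * rb
--     )
--
-- def initStack(aa, bb):
--     """"
--     Build a stack of leaf nodes. Instead of parents having a pointer to
--     each of its left & right leaves, every leaf has pointer to its
--     parent and a flag indicating left / right leaf. Thus we don't put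
--     parents in the stack here; we'll add them when their children finish
--     computing their own triples. We *could* add them now, I'm just
--     making memory a little easier and anticipating multithreaded queuing.
--     """
--     import collections
--     mystack = []
--     # Prime the pump with root node:
--     toSplit = [TreeNode(aa, bb, None, False)]
--     while len(toSplit) > 0:
--         node = toSplit.pop()
--         lo, hi = node.lohi
--         if lo + 1 != hi:
--             m = (lo + hi) // 2
--             toSplit.append(TreeNode(lo, m, node, True))
--             toSplit.append(TreeNode(m, hi, node, False))
--         else:
--             mystack.append(node)
--     return mystack
--
-- def new_binary_split(low, high):
--     stack = initStack(low, high)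
--     while item := stack.pop():
--         lo, hi = item.lohi
--         if lo + 1 == hi:
--             triple = computeLeaf(lo, hi)
--         else:
--             triple = computeNode(item.leftTriple, item.rightTriple)
--         parent = item.parentNode
--         isLeft = item.isLeft
--         item.nullify()
--         if (not parent):
--             if len(stack) > 0:
--                 raise Exception("Non-empty stack!")
--             return triple # EARLY RETURN
--         elif (isLeft):
--             parent.leftTriple = triple
--         else:
--             parent.rightTriple = triple
--         # Schedule parent for computation if they are ready...
--         if parent.leftTriple and parent.rightTriple:
--             stack.append(parent)
-- ===== SOURCE B (Python) =====
-- def computeLeaf(a, b):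
--     Pab = -(6*a - 5) * (2*a - 1) * (6*a - 1)
--     Qab = 10939058860032000 * a**3
--     Rab = Pab * (545140134*a + 13591409)
--     return Pab, Qab, Rab
--
-- def computeNode(tripleA, tripleB):
--     pa, qa, ra = tripleA
--     pb, qb, rb = tripleB
--     return (
--         pa * pb,
--         qa * qb,
--         qb * ra + pa * rb
--     )
--
-- def new_binary_split(low, high):
--     def bs(a, b):
--         if a + 1 == b:
--             return computeLeaf(a, b)
--         m = (a + b) // 2
--         return computeNode(bs(a, m), bs(m, b))
--     return bs(low, high)
-- ===== Notes on version B (the rewrite author's own statement) =====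
-- stated objective: simpler
-- what changed: Replaced the TreeNode class with parent pointers, the explicit leaf-building worklist and the ready-check stack machine by a five-line recursive helper bs(a,b) that splits at (a+b)//2 and combines left-then-right on the call stack.
import Mathlib
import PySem

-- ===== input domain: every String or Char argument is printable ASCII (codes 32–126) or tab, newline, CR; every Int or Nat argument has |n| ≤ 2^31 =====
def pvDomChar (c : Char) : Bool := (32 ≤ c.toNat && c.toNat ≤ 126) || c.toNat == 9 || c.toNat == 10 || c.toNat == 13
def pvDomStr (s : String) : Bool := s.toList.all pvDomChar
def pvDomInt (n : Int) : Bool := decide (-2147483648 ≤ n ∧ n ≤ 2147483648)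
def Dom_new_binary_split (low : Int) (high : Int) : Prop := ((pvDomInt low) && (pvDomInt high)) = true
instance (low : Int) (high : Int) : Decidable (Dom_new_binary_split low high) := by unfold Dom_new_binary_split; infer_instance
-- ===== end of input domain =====

-- B replaces A's TreeNode/parent-pointer/worklist stack machine by a direct (a+b)//2
-- binary-splitting recursion: simpler, same values on every terminating input (low < high).

-- ===== PORT A =====
-- shared module helpers (used verbatim by both Python versions)
def computeLeaf (a : Int) (_b : Int) : Int × Int × Int :=
  let Pab := -(6*a - 5) * (2*a - 1) * (6*a - 1)
  let Qab := 10939058860032000 * a^3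
  let Rab := Pab * (545140134*a + 13591409)
  (Pab, Qab, Rab)

def computeNode (tA : Int × Int × Int) (tB : Int × Int × Int) : Int × Int × Int :=
  (tA.1 * tB.1, tA.2.1 * tB.2.1, tB.2.1 * tA.2.2 + tA.1 * tB.2.2)

-- a Python TreeNode heap cell (nullify is never observed: the node is not read afterwards)
structure PVNode where
  lo : Int
  hi : Int
  parent : Option Nat
  isLeft : Bool
  lt : Option (Int × Int × Int)
  rt : Option (Int × Int × Int)
deriving Repr, DecidableEq

-- the object heap: node-id ↦ cell; attribute mutation = pointwise update
def hupd (h : Nat → PVNode) (i : Nat) (v : PVNode) : Nat → PVNode :=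
  fun j => if j = i then v else h j

-- initStack's while-loop (fuel only makes the loop total; Python diverges exactly where it runs out)
def initLoop : Nat → List Nat → List Nat → (Nat → PVNode) → Nat → List Nat × (Nat → PVNode)
  | 0, _, ms, h, _ => (ms, h)
  | _+1, [], ms, h, _ => (ms, h)
  | fuel+1, i :: rest, ms, h, ctr =>
      let n := h i
      if n.lo + 1 ≠ n.hi then
        let m := PySem.Int.floordiv (n.lo + n.hi) 2
        -- toSplit.append(left); toSplit.append(right): right is popped first
        let h' := hupd (hupd h ctr ⟨n.lo, m, some i, true, none, none⟩)
                       (ctr+1) ⟨m, n.hi, some i, false, none, none⟩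
        initLoop fuel ((ctr+1) :: ctr :: rest) ms h' (ctr+2)
      else
        initLoop fuel rest (i :: ms) h ctr

-- elif isLeft: parent.leftTriple = triple else: parent.rightTriple = triple
def postTriple (n : PVNode) (isLeft : Bool) (t : Int × Int × Int) : PVNode :=
  if isLeft then { n with lt := some t } else { n with rt := some t }

-- if parent.leftTriple and parent.rightTriple (triples are nonempty tuples: truthy iff set)
def ready (n : PVNode) : Bool := n.lt.isSome && n.rt.isSome

-- the main while-loop of new_binary_split (fuel guard for totality; the (0,0,0) arms are the
-- raising / diverging paths of the Python, all unreachable when low < high)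
def runStack : Nat → List Nat → (Nat → PVNode) → Int × Int × Int
  | 0, _, _ => (0, 0, 0)
  | _+1, [], _ => (0, 0, 0)          -- stack.pop() on empty raises IndexError
  | fuel+1, i :: rest, h =>
      let n := h i
      let triple :=
        if n.lo + 1 = n.hi then computeLeaf n.lo n.hi
        else match n.lt, n.rt with
             | some a, some b => computeNode a b
             | _, _ => (0, 0, 0)     -- unpacking None would raise
      match n.parent with
      | none => if rest.length > 0 then (0, 0, 0) /- raise Exception -/ else triple
      | some p =>
          let pn := postTriple (h p) n.isLeft triple
          let h' := hupd h p pn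
          if ready pn then runStack fuel (p :: rest) h' else runStack fuel rest h'

def new_binary_split (low : Int) (high : Int) : Int × Int × Int :=
  let fuel := (2*(high - low)).toNat + 1
  let h0 : Nat → PVNode := fun _ => ⟨low, high, none, false, none, none⟩  -- root at id 0
  let r := initLoop fuel [0] [] h0 1
  runStack fuel r.1 r.2

-- ===== PORT B =====
def bs (lo hi : Int) : Int × Int × Int :=
  if lo + 1 = hi then computeLeaf lo hi
  else
    let m := PySem.Int.floordiv (lo + hi) 2
    if h : lo < m ∧ m < hi then computeNode (bs lo m) (bs m hi)
    else (0, 0, 0)   -- totality guard only: the Python recursion diverges exactly here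
termination_by (hi - lo).toNat
decreasing_by all_goals omega

def new_binary_split_alt (low : Int) (high : Int) : Int × Int × Int := bs low high

-- ===== PRECONDITION & SPEC =====
-- A terminates exactly when low < high (otherwise initStack loops forever, except low+1=high which is a leaf — included).
def Pre_new_binary_split (low : Int) (high : Int) : Prop := low < high
instance (low : Int) (high : Int) : Decidable (Pre_new_binary_split low high) := by unfold Pre_new_binary_split; infer_instance
def pvWitness_new_binary_split : Int × Int := (1, 5)

def Spec_new_binary_split (low : Int) (high : Int) (out : Int × Int × Int) : Prop := out = new_binary_split_alt low high
instance (low : Int) (high : Int) (out : Int × Int × Int) : Decidable (Spec_new_binary_split low high out) := by unfold Spec_new_binary_split; infer_instance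

-- ===== CLAIM (what is proved, stated in full; the proofs are below) =====
def Claim_equal_new_binary_split : Prop := ∀ (low : Int) (high : Int), Dom_new_binary_split low high → Pre_new_binary_split low high → Spec_new_binary_split low high (new_binary_split low high)

-- ===== LEMMAS AND PROOFS =====

theorem hupd_self (h : Nat → PVNode) (i : Nat) (v : PVNode) : hupd h i v i = v := by
  simp [hupd]

theorem hupd_other (h : Nat → PVNode) (i j : Nat) (v : PVNode) (hj : j ≠ i) :
    hupd h i v j = h j := by
  simp [hupd, hj]

-- midpoint bounds for a splittable interval
theorem mid_bounds (lo hi : Int) (h1 : lo < hi) (h2 : lo + 1 ≠ hi) :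
    lo < PySem.Int.floordiv (lo + hi) 2 ∧ PySem.Int.floordiv (lo + hi) 2 < hi := by
  constructor
  · rw [show (lo < PySem.Int.floordiv (lo + hi) 2) ↔ (lo + 1 ≤ PySem.Int.floordiv (lo + hi) 2) by omega,
        PySem.Int.le_floordiv_iff_mul_le (by omega)]
    omega
  · rw [PySem.Int.floordiv_lt_iff_lt_mul (by omega)]
    omega

-- unfolding equations for bs
theorem bs_leaf (lo hi : Int) (h : lo + 1 = hi) : bs lo hi = computeLeaf lo hi := by
  rw [bs]; simp [h]

theorem bs_node (lo hi : Int) (h1 : lo < hi) (h2 : lo + 1 ≠ hi) :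
    bs lo hi = computeNode (bs lo (PySem.Int.floordiv (lo + hi) 2))
                           (bs (PySem.Int.floordiv (lo + hi) 2) hi) := by
  rw [bs]
  rw [if_neg h2, dif_pos (mid_bounds lo hi h1 h2)]

-- well-formed freshly-built subtree in the heap, with its node ids and its leaves in
-- phase-2 pop order (leftmost leaf first)
inductive WF (h : Nat → PVNode) : Nat → Int → Int → Option Nat → Bool → List Nat → List Nat → Prop
  | leaf : ∀ r lo hi p side, lo + 1 = hi →
      h r = ⟨lo, hi, p, side, none, none⟩ →
      WF h r lo hi p side [r] [r]
  | node : ∀ r lo hi p side m rl rr idsL lvsL idsR lvsR,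
      lo + 1 ≠ hi → lo < hi →
      m = PySem.Int.floordiv (lo + hi) 2 →
      h r = ⟨lo, hi, p, side, none, none⟩ →
      WF h rl lo m (some r) true idsL lvsL →
      WF h rr m hi (some r) false idsR lvsR →
      r ∉ idsL → r ∉ idsR → (∀ x ∈ idsL, x ∉ idsR) →
      WF h r lo hi p side (r :: (idsL ++ idsR)) (lvsL ++ lvsR)

theorem WF_frame {h h' : Nat → PVNode} {r : Nat} {lo hi : Int} {p : Option Nat} {side : Bool}
    {ids lvs : List Nat} (w : WF h r lo hi p side ids lvs)
    (hf : ∀ x ∈ ids, h' x = h x) : WF h' r lo hi p side ids lvs := by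
  induction w with
  | leaf r lo hi p side hl hr =>
      exact WF.leaf _ _ _ _ _ hl (by rw [hf r (by simp), hr])
  | node r lo hi p side m rl rr idsL lvsL idsR lvsR h1 h2 hm hr wL wR nL nR dis ihL ihR =>
      refine WF.node _ _ _ _ _ _ _ _ _ _ _ _ h1 h2 hm
        (by rw [hf r (by simp), hr])
        (ihL fun x hx => hf x (by simp [hx])) (ihR fun x hx => hf x (by simp [hx]))
        nL nR dis

theorem WF_width {h : Nat → PVNode} {r : Nat} {lo hi : Int} {p : Option Nat} {side : Bool}
    {ids lvs : List Nat} (w : WF h r lo hi p side ids lvs) :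
    1 ≤ hi - lo ∧ (ids.length : Int) = 2*(hi - lo) - 1 := by
  induction w with
  | leaf => simp_all; omega
  | node r lo hi p side m rl rr idsL lvsL idsR lvsR h1 h2 hm hr wL wR nL nR dis ihL ihR =>
      simp only [List.length_cons, List.length_append]
      push_cast
      omega

-- Phase 1: processing one splittable worklist entry builds the whole subtree, appends its
-- leaves (leftmost on top) to mystack, and touches only fresh ids.
theorem initLoop_split :
    ∀ (W : Nat) (lo hi : Int), (hi - lo).toNat ≤ W →
    ∀ (h : Nat → PVNode) (i ctr : Nat) (p : Option Nat) (side : Bool),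
      lo < hi → i < ctr →
      h i = ⟨lo, hi, p, side, none, none⟩ →
      ∃ ids lvs h' ctr',
        WF h' i lo hi p side ids lvs ∧
        ctr ≤ ctr' ∧
        (∀ x ∈ ids, x = i ∨ (ctr ≤ x ∧ x < ctr')) ∧
        (∀ x, x < ctr → h' x = h x) ∧
        (∀ rest ms extra,
          initLoop (ids.length + extra) (i :: rest) ms h ctr
            = initLoop extra rest (lvs ++ ms) h' ctr') := by
  intro W
  induction W with
  | zero => intro lo hi hW h i ctr p side hlt; omega
  | succ W ih =>
    intro lo hi hW h i ctr p side hlt hictr hhi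
    by_cases hleaf : lo + 1 = hi
    · refine ⟨[i], [i], h, ctr, WF.leaf _ _ _ _ _ hleaf hhi, le_refl _,
        (by intro x hx; simp at hx; left; exact hx), (by intro x _; rfl), ?_⟩
      intro rest ms extra
      rw [show ([i] : List Nat).length + extra = extra + 1 by simp [Nat.add_comm]]
      show initLoop (extra + 1) (i :: rest) ms h ctr = _
      simp [initLoop, hhi, hleaf]
    · -- split: allocate left at ctr, right at ctr+1, push left then right
      have hm := mid_bounds lo hi hlt hleaf
      set m := PySem.Int.floordiv (lo + hi) 2 with hmdef
      set hA := hupd (hupd h ctr ⟨lo, m, some i, true, none, none⟩)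
                     (ctr+1) ⟨m, hi, some i, false, none, none⟩ with hAdef
      have hAi : hA i = ⟨lo, hi, p, side, none, none⟩ := by
        rw [hAdef, hupd_other _ _ _ _ (by omega), hupd_other _ _ _ _ (by omega), hhi]
      have hAr : hA (ctr+1) = ⟨m, hi, some i, false, none, none⟩ := hupd_self _ _ _
      have hAl : hA ctr = ⟨lo, m, some i, true, none, none⟩ := by
        rw [hAdef, hupd_other _ _ _ _ (by omega), hupd_self]
      -- right subtree first
      obtain ⟨idsR, lvsR, h1, ctr1, wR, hc1, bR, fR, eqR⟩ :=
        ih m hi (by omega) hA (ctr+1) (ctr+2) (some i) false hm.2 (by omega) hAr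
      -- then left subtree
      have h1l : h1 ctr = ⟨lo, m, some i, true, none, none⟩ := by
        rw [fR ctr (by omega), hAl]
      obtain ⟨idsL, lvsL, h2, ctr2, wL, hc2, bL, fL, eqL⟩ :=
        ih lo m (by omega) h1 ctr ctr1 (some i) true hm.1 (by omega) h1l
      have hIdsR : ∀ x ∈ idsR, x = ctr + 1 ∨ (ctr + 2 ≤ x ∧ x < ctr1) := bR
      have hIdsL : ∀ x ∈ idsL, x = ctr ∨ (ctr1 ≤ x ∧ x < ctr2) := bL
      have fL' : ∀ x ∈ idsR, h2 x = h1 x := by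
        intro x hx; rcases hIdsR x hx with rfl | hx' <;> exact fL _ (by omega)
      have h2i : h2 i = ⟨lo, hi, p, side, none, none⟩ := by
        rw [fL i (by omega), fR i (by omega), hAi]
      refine ⟨i :: (idsL ++ idsR), lvsL ++ lvsR, h2, ctr2, ?_, by omega, ?_, ?_, ?_⟩
      · exact WF.node _ _ _ _ _ m ctr (ctr+1) idsL lvsL idsR lvsR hleaf hlt hmdef h2i
          wL (WF_frame wR fL')
          (by intro hmem; rcases hIdsL i hmem with h' | h' <;> omega)
          (by intro hmem; rcases hIdsR i hmem with h' | h' <;> omega)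
          (by intro x hxL hxR
              rcases hIdsL x hxL with rfl | h' <;> rcases hIdsR x hxR with h'' | h'' <;> omega)
      · intro x hx
        simp only [List.mem_cons, List.mem_append] at hx
        rcases hx with rfl | hx | hx
        · left; rfl
        · rcases hIdsL x hx with rfl | h' <;> right <;> omega
        · rcases hIdsR x hx with rfl | h' <;> right <;> omega
      · intro x hx
        rw [fL x (by omega), fR x (by omega), hAdef,
            hupd_other _ _ _ _ (by omega), hupd_other _ _ _ _ (by omega)]
      · intro rest ms extra
        have hfuel : (i :: (idsL ++ idsR)).length + extra
            = (idsR.length + (idsL.length + extra)) + 1 := by simp; omega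
        rw [hfuel]
        show initLoop ((idsR.length + (idsL.length + extra)) + 1) (i :: rest) ms h ctr = _
        have step : initLoop ((idsR.length + (idsL.length + extra)) + 1) (i :: rest) ms h ctr
            = initLoop (idsR.length + (idsL.length + extra)) ((ctr+1) :: ctr :: rest) ms hA (ctr+2) := by
          simp only [initLoop, hhi]
          rw [if_pos (by exact hleaf)]
        rw [step, eqR (ctr :: rest) ms (idsL.length + extra), eqL rest (lvsR ++ ms) extra]
        simp

theorem initLoop_nil (f : Nat) (ms : List Nat) (h : Nat → PVNode) (c : Nat) :
    initLoop f [] ms h c = (ms, h) := by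
  cases f <;> rfl

-- Phase 2: processing the leaves of a well-formed subtree computes bs of its interval and
-- posts it into the parent cell, touching only the subtree's ids (and finally the parent).
theorem runStack_split :
    ∀ (W : Nat) (lo hi : Int), (hi - lo).toNat ≤ W →
    ∀ (h : Nat → PVNode) (r p : Nat) (side : Bool) (ids lvs : List Nat),
      WF h r lo hi (some p) side ids lvs →
      p ∉ ids →
      ∃ h'', (∀ x, x ∉ ids → h'' x = h x) ∧
        ∀ rest extra,
          runStack (ids.length + extra) (lvs ++ rest) h =
            (let pn := postTriple (h p) side (bs lo hi)
             runStack extra (if ready pn then p :: rest else rest) (hupd h'' p pn)) := by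
  intro W
  induction W with
  | zero =>
    intro lo hi hW h r p side ids lvs w
    have := WF_width w; omega
  | succ W ih =>
    intro lo hi hW h r p side ids lvs w hp
    cases w with
    | leaf _ _ _ _ _ hleaf hr =>
      refine ⟨h, fun x _ => rfl, ?_⟩
      intro rest extra
      simp at hp
      rw [show ([r] : List Nat).length + extra = extra + 1 by simp [Nat.add_comm]]
      show runStack (extra + 1) (r :: rest) h = _
      simp [runStack, hr, hleaf, bs_leaf lo hi hleaf]
      split_ifs <;> rfl
    | node _ _ _ _ _ m rl rr idsL lvsL idsR lvsR h1 h2 hm hr wL wR nL nR dis =>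
      simp only [List.mem_cons, List.mem_append, not_or] at hp
      obtain ⟨hpr, hpL, hpR⟩ := hp
      have hmid := mid_bounds lo hi h2 h1
      have hma : lo < m := by rw [hm]; exact hmid.1
      have hmb : m < hi := by rw [hm]; exact hmid.2
      -- left subtree posts bs lo m into r.lt
      obtain ⟨hL, fLout, eqL⟩ :=
        ih lo m (by omega) h rl r true idsL lvsL wL nL
      set pnL := postTriple (h r) true (bs lo m) with hpnL
      have hpnLval : pnL = ⟨lo, hi, some p, side, some (bs lo m), none⟩ := by
        rw [hpnL, hr]; rfl
      set h2' := hupd hL r pnL with h2'def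
      -- right subtree is intact in h2'
      have wR2 : WF h2' rr m hi (some r) false idsR lvsR := by
        refine WF_frame wR ?_
        intro x hx
        rw [h2'def, hupd_other _ _ _ _ (fun hxr => nR (by rwa [hxr] at hx)),
            fLout x (fun hxL => dis x hxL hx)]
      obtain ⟨hR, fRout, eqR⟩ := ih m hi (by omega) h2' rr r false idsR lvsR wR2 nR
      set pnR := postTriple (h2' r) false (bs m hi) with hpnR
      have hpnRval : pnR = ⟨lo, hi, some p, side, some (bs lo m), some (bs m hi)⟩ := by
        rw [hpnR, h2'def, hupd_self, hpnLval]; rfl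
      set h4 := hupd hR r pnR with h4def
      have h4r : h4 r = pnR := hupd_self _ _ _
      have h4p : h4 p = h p := by
        rw [h4def, hupd_other _ _ _ _ hpr, fRout p hpR, h2'def,
            hupd_other _ _ _ _ hpr, fLout p hpL]
      refine ⟨h4, ?_, ?_⟩
      · intro x hx
        simp only [List.mem_cons, List.mem_append, not_or] at hx
        obtain ⟨hxr, hxL, hxR⟩ := hx
        rw [h4def, hupd_other _ _ _ _ hxr, fRout x hxR, h2'def,
            hupd_other _ _ _ _ hxr, fLout x hxL]
      · intro rest extra
        have hfuel : (r :: (idsL ++ idsR)).length + extra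
            = idsL.length + (idsR.length + (extra + 1)) := by simp; omega
        rw [hfuel]
        have hstack : (lvsL ++ lvsR) ++ rest = lvsL ++ (lvsR ++ rest) := by simp
        rw [hstack, eqL (lvsR ++ rest) (idsR.length + (extra + 1))]
        have hnotready : ready pnL = false := by rw [hpnLval]; rfl
        simp only [hnotready, Bool.false_eq_true, if_false]
        rw [← h2'def, eqR rest (extra + 1)]
        have hready : ready pnR = true := by rw [hpnRval]; rfl
        simp only [hready, if_true]
        rw [← h4def]
        show runStack (extra + 1) (r :: rest) h4 = _
        have hbs : bs lo hi = computeNode (bs lo m) (bs m hi) := by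
          rw [bs_node lo hi h2 h1, hm]
        simp [runStack, h4r, hpnRval, h1, h4p, hbs]
        split_ifs <;> rfl

-- ===== VERDICT (by name: the statement is the Claim_ definition above) =====
theorem new_binary_split_spec : Claim_equal_new_binary_split := by
  intro low high _ hpre
  unfold Spec_new_binary_split new_binary_split new_binary_split_alt
  set F := (2*(high - low)).toNat + 1 with hF
  set h0 : Nat → PVNode := fun _ => ⟨low, high, none, false, none, none⟩ with h0def
  obtain ⟨ids, lvs, h', ctr', w, _, _, _, eqI⟩ :=
    initLoop_split (high - low).toNat low high (le_refl _) h0 0 1 none false hpre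
      (by omega) rfl
  have hlen : (ids.length : Int) = 2*(high - low) - 1 := (WF_width w).2
  obtain ⟨E, hE⟩ : ∃ E, F = ids.length + E := ⟨F - ids.length, by omega⟩
  have hinit : initLoop F [0] [] h0 1 = (lvs, h') := by
    rw [hE, eqI [] [] E, initLoop_nil]; simp
  show runStack F (initLoop F [0] [] h0 1).1 (initLoop F [0] [] h0 1).2 = bs low high
  rw [hinit]
  by_cases hleaf : low + 1 = high
  · cases w with
    | leaf _ _ _ _ _ _ hr =>
      show runStack F [0] h' = bs low high
      rw [show F = E + 1 by simp at hE; omega]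
      show runStack (E + 1) (0 :: []) h' = bs low high
      simp [runStack, hr, hleaf, bs_leaf low high hleaf]
    | node => exact absurd hleaf (by assumption)
  · cases w with
    | leaf => exact absurd hleaf (by simpa using (by assumption : low + 1 = high))
    | node _ _ _ _ _ m rl rr idsL lvsL idsR lvsR h1 h2 hm hr wL wR nL nR dis =>
      have hmid := mid_bounds low high h2 h1
      have hma : low < m := by rw [hm]; exact hmid.1
      have hmb : m < high := by rw [hm]; exact hmid.2
      obtain ⟨hL, fLout, eqL⟩ :=
        runStack_split (m - low).toNat low m (le_refl _) h' rl 0 true idsL lvsL wL nL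
      set pnL := postTriple (h' 0) true (bs low m) with hpnL
      have hpnLval : pnL = ⟨low, high, none, false, some (bs low m), none⟩ := by
        rw [hpnL, hr]; rfl
      set hB := hupd hL 0 pnL with hBdef
      have wR2 : WF hB rr m high (some 0) false idsR lvsR := by
        refine WF_frame wR ?_
        intro x hx
        rw [hBdef, hupd_other _ _ _ _ (fun hx0 => nR (by rwa [hx0] at hx)),
            fLout x (fun hxL => dis x hxL hx)]
      obtain ⟨hR, fRout, eqR⟩ :=
        runStack_split (high - m).toNat m high (le_refl _) hB rr 0 false idsR lvsR wR2 nR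
      set pnR := postTriple (hB 0) false (bs m high) with hpnR
      have hpnRval : pnR = ⟨low, high, none, false, some (bs low m), some (bs m high)⟩ := by
        rw [hpnR, hBdef, hupd_self, hpnLval]; rfl
      have hfuel : F = idsL.length + (idsR.length + (E + 1)) := by
        simp at hE; omega
      show runStack F (lvsL ++ lvsR) h' = bs low high
      rw [hfuel, show (lvsL ++ lvsR : List Nat) = lvsL ++ (lvsR ++ []) by simp,
          eqL (lvsR ++ []) (idsR.length + (E + 1))]
      have hnotready : ready pnL = false := by rw [hpnLval]; rfl
      simp only [hnotready, Bool.false_eq_true, if_false]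
      rw [← hBdef, show (lvsR ++ [] : List Nat) = lvsR by simp, ← List.append_nil lvsR,
          eqR [] (E + 1)]
      have hready : ready pnR = true := by rw [hpnRval]; rfl
      simp only [hready, if_true]
      show runStack (E + 1) (0 :: []) (hupd hR 0 pnR) = bs low high
      have hbs : bs low high = computeNode (bs low m) (bs m high) := by
        rw [bs_node low high h2 h1, hm]
      simp [runStack, hupd_self, hpnRval, h1, hbs]
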